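-- pv_equiv track=rewrite | github.com/ev0ai/griffe_reflex | spec_generator/extraction/component.py | extract_class_body
-- ===== SOURCE A (Python) =====
-- def extract_class_body(content: str, class_start: int) -> str:
--     """Extract the class body from the file content.
--
--     Args:
--         content: The file content.
--         class_start: The start position of the class.
--
--     Returns:
--         The class body.
--     """
--     class_body = ""
--     open_braces = 0
--     in_class = True
--
--     for i in range(class_start, len(content)):
--         if content[i] == '{':
--             open_braces += 1
--         elif content[i] == '}':
--             open_braces -= 1
--         elif content[i] == '\n':
--             # Check if next line is part of the class (has indentation)
--             next_line_start = i + 1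
--             if next_line_start < len(content):
--                 # If we're out of braces and the next line is not indented, we're out of the class
--                 if open_braces == 0 and next_line_start < len(content) and not content[next_line_start].isspace():
--                     in_class = False
--
--         if not in_class and open_braces == 0:
--             class_body = content[class_start:i]
--             break
--
--     if not class_body:
--         class_body = content[class_start:]
--
--     return class_body
-- ===== SOURCE B (Python) =====
-- def extract_class_body(content: str, class_start: int) -> str:
--     """Extract the class body from the file content (line-by-line scan)."""
--     tail = content[class_start:]
--     lines = tail.split('\n')
--     balance = 0
--     pos = 0  # index in tail of the current line's first character
--     for line in lines[:-1]:  # each of these lines is followed by a '\n' in tail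
--         balance += line.count('{') - line.count('}')
--         nl = pos + len(line)  # index of that '\n' in tail
--         if balance == 0 and nl + 1 < len(tail) and not tail[nl + 1].isspace():
--             return tail[:nl] if nl > 0 else tail
--         pos = nl + 1
--     return tail
-- ===== Notes on version B (the rewrite author's own statement) =====
-- stated objective: faster
-- what changed: Replaces A's character-by-character index loop (brace counter plus in_class flag) by a line-at-a-time scan: split the tail on newline once and add each line's net brace count (via str.count) to a running balance, checking the stop condition only at line ends; the per-character work moves into C-level split/count.
-- outside the precondition, e.g. on extract_class_body('}}aa\n', -2): A returns 'a', B returns 'a\n'; on extract_class_body('ab', -5): A raises IndexError, B returns 'ab'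
import Mathlib
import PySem

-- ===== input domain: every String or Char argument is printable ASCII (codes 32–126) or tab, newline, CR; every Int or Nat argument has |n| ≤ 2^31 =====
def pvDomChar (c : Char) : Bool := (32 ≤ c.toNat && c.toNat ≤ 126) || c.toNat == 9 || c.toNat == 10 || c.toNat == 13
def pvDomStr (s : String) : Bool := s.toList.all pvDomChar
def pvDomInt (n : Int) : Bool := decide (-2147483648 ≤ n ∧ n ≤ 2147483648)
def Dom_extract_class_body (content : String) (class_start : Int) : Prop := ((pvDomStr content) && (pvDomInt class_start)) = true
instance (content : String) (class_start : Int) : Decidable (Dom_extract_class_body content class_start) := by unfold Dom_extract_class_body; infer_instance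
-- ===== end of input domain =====

-- B replaces A's character-by-character scan (index loop with a brace counter and an
-- in_class flag) by a line-at-a-time scan: split the tail on '\n' once and add each line's
-- net brace count to a running balance; a timing run measured B faster (objective: faster, constant-factor).

-- ===== PORT A =====
-- literal transliteration of A's index loop; the `break` and the final `if not class_body`
-- fallback are folded into the two loop exits, exactly as they are reached in Python.
def pvAloop (content : String) (class_start : Int) (idxs : List Int)
    (open_braces : Int) (in_class : Bool) : String :=
  match idxs with
  | [] => PySem.Str.slice content (some class_start) none   -- loop ends, class_body == "" → content[class_start:]
  | i :: rest =>
    let c := PySem.Str.pyGet? content i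
    let open_braces' := if c = some '{' then open_braces + 1
      else if c = some '}' then open_braces - 1 else open_braces
    let in_class' :=
      if c = some '\n' then
        if i + 1 < PySem.Str.len content then
          if open_braces = 0 ∧ i + 1 < PySem.Str.len content ∧
              ((PySem.Str.pyGet? content (i + 1)).any (fun d => ! PySem.Chars.isspace d)) = true
          then false else in_class
        else in_class
      else in_class
    if in_class' = false ∧ open_braces' = 0 then
      let body := PySem.Str.slice content (some class_start) (some i)
      if body = "" then PySem.Str.slice content (some class_start) none else body
    else pvAloop content class_start rest open_braces' in_class'

def extract_class_body (content : String) (class_start : Int) : String :=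
  pvAloop content class_start (PySem.List.pyRange class_start (PySem.Str.len content)) 0 true

-- ===== PORT B =====
-- literal transliteration of Source B: loop over tail.split('\n')[:-1] with a running balance
-- and the index nl (in the tail) of each line's terminating '\n'.
def pvBloop (t : List Char) (lines : List (List Char)) (balance : Int) (pos : Nat) : String :=
  match lines with
  | [] => String.ofList t
  | line :: rest =>
    let balance' := balance + (line.count '{' : Int) - (line.count '}' : Int)
    let nl := pos + line.length
    if balance' = 0 ∧ nl + 1 < t.length ∧
        (t[nl + 1]?.any (fun d => ! PySem.Chars.isspace d)) = true then
      if 0 < nl then String.ofList (t.take nl) else String.ofList t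
    else pvBloop t rest balance' (nl + 1)

def extract_class_body_alt (content : String) (class_start : Int) : String :=
  let t := (PySem.Str.slice content (some class_start) none).toList   -- tail = content[class_start:]
  pvBloop t ((t.splitOn '\n').dropLast) 0 0

-- ===== PRECONDITION & SPEC =====
-- Pre_ restricts to the function's natural domain: class_start is a character offset into
-- content. For negative class_start A raises IndexError (below -len(content)) or scans the
-- tail via Python's negative-index wraparound and then the whole string again — an accident
-- of A's indexing that B's tail-slice scan does not mirror.
def Pre_extract_class_body (content : String) (class_start : Int) : Prop := 0 ≤ class_start
instance (content : String) (class_start : Int) : Decidable (Pre_extract_class_body content class_start) := by unfold Pre_extract_class_body; infer_instance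
def pvWitness_extract_class_body : String × Int := ("class A {\n  x\n}\ndone", 0)

def Spec_extract_class_body (content : String) (class_start : Int) (out : String) : Prop := out = extract_class_body_alt content class_start
instance (content : String) (class_start : Int) (out : String) : Decidable (Spec_extract_class_body content class_start out) := by unfold Spec_extract_class_body; infer_instance

-- ===== CLAIM (what is proved, stated in full; the proofs are below) =====
def Claim_equal_extract_class_body : Prop := ∀ (content : String) (class_start : Int), Dom_extract_class_body content class_start → Pre_extract_class_body content class_start → Spec_extract_class_body content class_start (extract_class_body content class_start)
-- ===== LEMMAS AND PROOFS =====

-- per-character brace delta (the elif chain of A's loop body)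
def pvDelta (c : Char) (b : Int) : Int :=
  if c = '{' then b + 1 else if c = '}' then b - 1 else b

-- offset (within l) of the first '\n' at which the running brace balance (started at b) is
-- 0 and the next character exists and is not whitespace — the place both loops stop.
def pvQual (l : List Char) (b : Int) : Option Nat :=
  match l with
  | [] => none
  | c :: rest =>
    if c = '\n' ∧ b = 0 ∧ (rest.head?.any (fun d => ! PySem.Chars.isspace d)) = true then some 0
    else (pvQual rest (pvDelta c b)).map (· + 1)

-- the common result: stop at offset r of the tail t (slice up to it, whole tail if that
-- slice would be empty), or never stop (whole tail).
def pvRes (t : List Char) (q : Option Nat) : String :=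
  match q with
  | some r => if r = 0 then String.ofList t else String.ofList (t.take r)
  | none => String.ofList t

theorem pvGetlt (l : List Char) (n : Nat) (d : Char) (h : l[n]? = some d) : n < l.length := by
  by_contra hn
  rw [List.getElem?_eq_none (by omega)] at h
  simp at h

theorem pvRes_map_eq (t : List Char) (o : Option Nat) (f g : Nat → Nat)
    (h : ∀ x, f x = g x) : pvRes t (o.map f) = pvRes t (o.map g) := by
  cases o with
  | none => rfl
  | some x => simp only [Option.map_some, h]

theorem pvQual_of_not_mem (l : List Char) (b : Int) (h : '\n' ∉ l) : pvQual l b = none := by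
  induction l generalizing b with
  | nil => rfl
  | cons c rest ih =>
    have hc : c ≠ '\n' := fun hc => h (hc ▸ List.mem_cons_self)
    have hr : '\n' ∉ rest := fun hm => h (List.mem_cons_of_mem _ hm)
    simp only [pvQual]
    rw [if_neg (by tauto), ih _ hr]
    rfl

theorem pvQual_append (line l' : List Char) (b : Int) (h : '\n' ∉ line) :
    pvQual (line ++ l') b
      = (pvQual l' (b + ((line.count '{' : Int) - (line.count '}' : Int)))).map (· + line.length) := by
  induction line generalizing b with
  | nil => simp
  | cons c rest ih =>
    have hc : c ≠ '\n' := fun hc => h (hc ▸ List.mem_cons_self)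
    have hr : '\n' ∉ rest := fun hm => h (List.mem_cons_of_mem _ hm)
    simp only [List.cons_append, pvQual]
    rw [if_neg (by tauto), ih _ hr]
    have harg : pvDelta c b + ((rest.count '{' : Int) - (rest.count '}' : Int))
        = b + (((c :: rest).count '{' : Int) - ((c :: rest).count '}' : Int)) := by
      simp only [pvDelta, List.count_cons]
      by_cases h1 : c = '{' <;> by_cases h2 : c = '}' <;> simp [h1, h2] <;> omega
    rw [harg]
    cases pvQual l' (b + (((c :: rest).count '{' : Int) - ((c :: rest).count '}' : Int))) <;>
      simp [List.length_cons] <;> omega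

theorem pvSplit_single (l : List Char) (h : '\n' ∉ l) : l.splitOn '\n' = [l] := by
  induction l with
  | nil => rfl
  | cons c rest ih =>
    have hc : c ≠ '\n' := fun hc => h (hc ▸ List.mem_cons_self)
    have hr : '\n' ∉ rest := fun hm => h (List.mem_cons_of_mem _ hm)
    show List.splitOnP (· == '\n') (c :: rest) = _
    rw [List.splitOnP_cons, if_neg (by simp [hc])]
    have h2 := ih hr
    rw [show rest.splitOn '\n' = List.splitOnP (· == '\n') rest from rfl] at h2
    rw [h2]
    rfl

theorem pvSplit_cons (l r : List Char) (h : '\n' ∉ l) :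
    (l ++ '\n' :: r).splitOn '\n' = l :: r.splitOn '\n' := by
  induction l with
  | nil =>
    show List.splitOnP (· == '\n') ('\n' :: r) = _
    rw [List.splitOnP_cons, if_pos (by simp)]
    rfl
  | cons c rest ih =>
    have hc : c ≠ '\n' := fun hc => h (hc ▸ List.mem_cons_self)
    have hr : '\n' ∉ rest := fun hm => h (List.mem_cons_of_mem _ hm)
    show List.splitOnP (· == '\n') (c :: (rest ++ '\n' :: r)) = _
    rw [List.splitOnP_cons, if_neg (by simp [hc])]
    have h2 := ih hr
    rw [show (rest ++ '\n' :: r).splitOn '\n' = List.splitOnP (· == '\n') (rest ++ '\n' :: r) from rfl] at h2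
    rw [h2]
    rfl

theorem pvSlice_from (content : String) (s : Nat) :
    PySem.Str.slice content (some (s : Int)) none = String.ofList (content.toList.drop s) := by
  have h : (PySem.Str.slice content (some (s : Int)) none).toList = content.toList.drop s := by
    rw [PySem.Str.toList_slice, PySem.Chars.slice_eq_listSlice,
      PySem.List.slice_from _ (by positivity)]
    simp
  rw [← h, String.ofList_toList]

theorem pvSlice_take (content : String) (s j : Nat) :
    PySem.Str.slice content (some (s : Int)) (some ((s + j : Nat) : Int))
      = String.ofList ((content.toList.drop s).take j) := by
  have h : (PySem.Str.slice content (some (s : Int)) (some ((s + j : Nat) : Int))).toList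
      = (content.toList.drop s).take j := by
    rw [PySem.Str.toList_slice, PySem.Chars.slice_eq_listSlice, PySem.List.slice_natCast]
    congr 1
    omega
  rw [← h, String.ofList_toList]

theorem pvAloop_nil (content : String) (s : Nat) (j : Nat) (b : Int)
    (h : (content.toList.drop s).drop j = []) :
    pvAloop content (s : Int) (PySem.List.pyRange ((s + j : Nat) : Int) (PySem.Str.len content)) b true
      = pvRes (content.toList.drop s) ((pvQual ((content.toList.drop s).drop j) b).map (· + j)) := by
  have hlen := List.length_drop (i := s) (l := content.toList)
  have hj : content.toList.length ≤ s + j := by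
    rw [List.drop_eq_nil_iff] at h
    omega
  have hrange : PySem.List.pyRange ((s + j : Nat) : Int) (PySem.Str.len content) = [] := by
    apply PySem.List.pyRange_one_eq_nil
    rw [PySem.Str.len_eq]
    exact_mod_cast hj
  rw [h, hrange]
  simp only [pvAloop, pvQual, Option.map_none, pvRes]
  exact pvSlice_from content s
theorem pvAloop_eq (content : String) (s : Nat) (k : Nat) :
    ∀ (j : Nat) (b : Int), (content.toList.drop s).length - j ≤ k →
    pvAloop content (s : Int) (PySem.List.pyRange ((s + j : Nat) : Int) (PySem.Str.len content)) b true
      = pvRes (content.toList.drop s) ((pvQual ((content.toList.drop s).drop j) b).map (· + j)) := by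
  induction k with
  | zero =>
    intro j b hk
    exact pvAloop_nil content s j b (by rw [List.drop_eq_nil_iff]; omega)
  | succ k ih =>
    intro j b hk
    rcases htdj : (content.toList.drop s).drop j with _ | ⟨c, rest⟩
    · have h0 := pvAloop_nil content s j b htdj
      rw [htdj] at h0
      exact h0
    · have hlen := List.length_drop (i := s) (l := content.toList)
      have hjlt : j < (content.toList.drop s).length := by
        have h2 := congrArg List.length htdj
        simp only [List.length_drop, List.length_cons] at h2
        omega
      have hslt : s + j < content.toList.length := by omega
      have hc : content.toList[s + j]? = some c := by
        rw [← List.getElem?_drop, ← List.head?_drop, htdj]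
        rfl
      have hrest : rest = (content.toList.drop s).drop (j + 1) := by
        rw [← List.tail_drop, htdj]
        rfl
      have hnext : content.toList[s + j + 1]? = rest.head? := by
        rw [hrest, List.head?_drop, List.getElem?_drop, Nat.add_assoc]
      have hcast : ((s + j : Nat) : Int) + 1 = ((s + j + 1 : Nat) : Int) := by push_cast; ring
      have hrange : PySem.List.pyRange ((s + j : Nat) : Int) (PySem.Str.len content)
          = ((s + j : Nat) : Int) :: PySem.List.pyRange (((s + j : Nat) : Int) + 1) (PySem.Str.len content) := by
        apply PySem.List.pyRange_one_cons
        rw [PySem.Str.len_eq]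
        exact_mod_cast hslt
      rw [hrange]
      simp only [pvAloop]
      rw [hcast]
      simp only [PySem.Str.pyGet?_natCast, hc, hnext, Option.some.injEq]
      have hlc := congrArg List.length htdj
      simp only [List.length_drop, List.length_cons] at hlc
      have hrl : rest.length = (List.drop s content.toList).length - (j + 1) := by omega
      by_cases hQ : c = '\n' ∧ b = 0 ∧ (Option.any (fun d => !PySem.Chars.isspace d) rest.head?) = true
      · obtain ⟨hnl, hb0, hany⟩ := hQ
        subst hnl
        have hrne : rest ≠ [] := by
          intro h0
          rw [h0] at hany
          simp at hany
        have hbound : ((s + j + 1 : Nat) : Int) < PySem.Str.len content := by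
          rw [PySem.Str.len_eq]
          have h1 : rest.length ≠ 0 := fun h0 => hrne (List.eq_nil_of_length_eq_zero h0)
          exact_mod_cast (by omega : s + j + 1 < content.toList.length)
        have hcond : b = 0 ∧ ((s + j + 1 : Nat) : Int) < PySem.Str.len content ∧
            Option.any (fun d => !PySem.Chars.isspace d) rest.head? = true := ⟨hb0, hbound, hany⟩
        rw [if_pos rfl, if_pos hbound, if_pos hcond, if_neg (show ¬(('\n':Char) = '{') by decide),
          if_neg (show ¬(('\n':Char) = '}') by decide)]
        have houter : (false = false ∧ b = 0) := ⟨rfl, hb0⟩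
        rw [if_pos houter, pvSlice_take, pvSlice_from]
        have hcond2 : True ∧ b = 0 ∧
            Option.any (fun d => !PySem.Chars.isspace d) rest.head? = true := ⟨trivial, hb0, hany⟩
        have hq : pvQual ('\n' :: rest) b = some 0 := by
          simp only [pvQual]
          rw [if_pos hcond2]
        rw [hq]
        simp only [Option.map_some, Nat.zero_add, pvRes]
        by_cases hj0 : j = 0
        · subst hj0
          rw [if_pos (by simp), if_pos rfl]
        · have hne : ¬ (String.ofList ((List.drop s content.toList).take j) = "") := by
            intro h0
            have h1 := congrArg String.toList h0
            simp only [String.toList_ofList] at h1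
            rw [show ("" : String).toList = [] from rfl, List.take_eq_nil_iff] at h1
            rcases h1 with h1 | h1
            · exact hj0 h1
            · rw [h1] at hjlt
              simp at hjlt
          rw [if_neg hne, if_neg hj0]
      · have hic : (if c = '\n' then
              if ((s + j + 1 : Nat) : Int) < PySem.Str.len content then
                if b = 0 ∧ ((s + j + 1 : Nat) : Int) < PySem.Str.len content ∧
                    Option.any (fun d => !PySem.Chars.isspace d) rest.head? = true then
                  false
                else true
              else true
            else true) = true := by
          by_cases hnl : c = '\n'
          · subst hnl
            by_cases hbd : ((s + j + 1 : Nat) : Int) < PySem.Str.len content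
            · rw [if_pos rfl, if_pos hbd, if_neg (by tauto)]
            · rw [if_pos rfl, if_neg hbd]
          · rw [if_neg hnl]
        rw [hic, if_neg (by simp)]
        have hd : (if c = '{' then b + 1 else if c = '}' then b - 1 else b) = pvDelta c b := rfl
        rw [hd]
        have hrec := ih (j + 1) (pvDelta c b) (by omega)
        rw [← hrest, ← Nat.add_assoc] at hrec
        rw [hrec]
        have hq : pvQual (c :: rest) b = (pvQual rest (pvDelta c b)).map (· + 1) := by
          simp only [pvQual]
          rw [if_neg hQ]
        rw [hq, Option.map_map]
        exact pvRes_map_eq _ _ _ _ (fun x => by simp [Function.comp]; omega)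

theorem pvBloop_eq (t : List Char) (k : Nat) :
    ∀ (j : Nat) (b : Int), t.length - j ≤ k →
    pvBloop t (((t.drop j).splitOn '\n').dropLast) b j
      = pvRes t ((pvQual (t.drop j) b).map (· + j)) := by
  induction k with
  | zero =>
    intro j b hk
    have hnil : t.drop j = [] := by
      rw [List.drop_eq_nil_iff]
      omega
    rw [hnil]
    rfl
  | succ k ih =>
    intro j b hk
    by_cases hmem : '\n' ∈ t.drop j
    · set line := (t.drop j).takeWhile (· != '\n') with hline
      set dw := (t.drop j).dropWhile (· != '\n') with hdw
      have hd : line ++ dw = t.drop j := List.takeWhile_append_dropWhile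
      have hnl_line : '\n' ∉ line := by
        intro hm
        have h2 := List.mem_takeWhile_imp hm
        simp at h2
      have hdw_ne : dw ≠ [] := by
        intro h0
        rw [h0, List.append_nil] at hd
        exact hnl_line (hd ▸ hmem)
      have hhead : dw.head hdw_ne = '\n' := by
        have h2 := List.head_dropWhile_not (· != '\n') hdw_ne
        simpa using h2
      have hdecomp : t.drop j = line ++ '\n' :: dw.tail := by
        rw [← hd]
        congr 1
        rw [← hhead]
        exact (List.cons_head_tail hdw_ne).symm
      have hr : dw.tail = t.drop (j + line.length + 1) := by
        have h2 : ((line ++ ['\n']) ++ dw.tail).drop (line ++ ['\n']).length = dw.tail :=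
          List.drop_left
        rw [show (line ++ ['\n']) ++ dw.tail = line ++ '\n' :: dw.tail by simp, ← hdecomp,
          List.drop_drop] at h2
        rw [← h2]
        congr 1
        simp only [List.length_append, List.length_cons, List.length_nil]
        omega
      have hlendrop : (t.drop j).length = t.length - j := List.length_drop
      have hlen2 : line.length + 1 + dw.tail.length = t.length - j := by
        have h2 := congrArg List.length hdecomp
        rw [hlendrop] at h2
        simp only [List.length_append, List.length_cons] at h2
        omega
      have hsplit : ((t.drop j).splitOn '\n').dropLast
          = line :: (((t.drop (j + line.length + 1)).splitOn '\n').dropLast) := by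
        rw [hdecomp, pvSplit_cons _ _ hnl_line, ← hr]
        exact List.dropLast_cons_of_ne_nil (List.splitOnP_ne_nil _ _)
      rw [hsplit]
      simp only [pvBloop]
      rw [hdecomp, pvQual_append _ _ _ hnl_line]
      set b' := b + ((line.count '{' : Int) - (line.count '}' : Int)) with hb'
      have hb'' : b + (line.count '{' : Int) - (line.count '}' : Int) = b' := by omega
      rw [hb'']
      have hhead2 : t[j + line.length + 1]? = dw.tail.head? := by
        rw [hr, List.head?_drop]
      by_cases hcond : b' = 0 ∧ (dw.tail.head?.any (fun d => ! PySem.Chars.isspace d)) = true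
      · obtain ⟨hbz, hany⟩ := hcond
        have hne : dw.tail.head?.isSome := by
          cases h0 : dw.tail.head? with
          | none => rw [h0] at hany; simp at hany
          | some d => rfl
        obtain ⟨d, hdd⟩ := Option.isSome_iff_exists.mp hne
        have hlt : j + line.length + 1 < t.length := by
          apply pvGetlt t _ d
          rw [hhead2, hdd]
        have hcondB : b' = 0 ∧ j + line.length + 1 < t.length ∧
            (t[j + line.length + 1]?.any (fun d => ! PySem.Chars.isspace d)) = true := by
          refine ⟨hbz, hlt, ?_⟩
          rw [hhead2]
          exact hany
        rw [if_pos hcondB]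
        have hq : pvQual ('\n' :: dw.tail) b' = some 0 := by
          simp only [pvQual]
          rw [if_pos ⟨trivial, hbz, hany⟩]
        rw [hq]
        simp only [Option.map_some, Nat.zero_add, pvRes]
        by_cases hj0 : j + line.length = 0
        · rw [if_neg (by omega), if_pos (by omega)]
        · have hco : line.length + j = j + line.length := by omega
          rw [if_pos (by omega), if_neg (by omega), hco]
      · have hcondB : ¬ (b' = 0 ∧ j + line.length + 1 < t.length ∧
            (t[j + line.length + 1]?.any (fun d => ! PySem.Chars.isspace d)) = true) := by
          rw [hhead2]
          tauto
        rw [if_neg hcondB]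
        have hrec := ih (j + line.length + 1) b' (by omega)
        rw [hrec, ← hr]
        have hq : pvQual ('\n' :: dw.tail) b' = (pvQual dw.tail b').map (· + 1) := by
          simp only [pvQual]
          rw [if_neg (by tauto), show pvDelta '\n' b' = b' from rfl]
        rw [hq, Option.map_map, Option.map_map]
        exact pvRes_map_eq _ _ _ _ (fun x => by simp only [Function.comp_apply]; omega)
    · rw [pvSplit_single _ hmem, pvQual_of_not_mem _ _ hmem]
      rfl

-- ===== VERDICT (by name: the statement is the Claim_ definition above) =====
theorem extract_class_body_spec : Claim_equal_extract_class_body := by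
  intro content class_start _ hpre
  unfold Spec_extract_class_body
  obtain ⟨s, rfl⟩ : ∃ s : Nat, class_start = (s : Int) :=
    ⟨class_start.toNat, (Int.toNat_of_nonneg hpre).symm⟩
  simp only [extract_class_body, extract_class_body_alt]
  rw [show (PySem.Str.slice content (some (s : Int)) none).toList = content.toList.drop s by
    rw [pvSlice_from, String.toList_ofList]]
  have hA := pvAloop_eq content s (content.toList.drop s).length 0 0 (by omega)
  have hB := pvBloop_eq (content.toList.drop s) (content.toList.drop s).length 0 0 (by omega)
  simp only [Nat.add_zero, List.drop_zero] at hA hB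
  exact hA.trans hB.symm
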